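-- pv_equiv track=rewrite | github.com/Benjamin-Loison/LemnosLife | Scripts/Python/LZ biomes.py | longestAlphabet
-- ===== SOURCE A (Python) =====
-- def longest(string, char): # assume char is in string
--     index, tmpIndex = 0, 0
--     long, tmpLong = 0, 0
--     for i in range(len(string)):
--         c = string[i]
--         if c == char:
--             if tmpLong == 0:
--                 tmpIndex = i
--             tmpLong += 1
--         else:
--             if tmpLong > long:
--                 long, index = tmpLong, tmpIndex
--             tmpLong, tmpIndex = 0, 0
--     if tmpLong > long: # if longest array is at the end
--         long = tmpLong
--         index = tmpIndex
--     return long, index # seems to work fine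
--
-- def longestAlphabet(string, alphabet):
--     index, tmpIndex = 0, 0
--     long, tmpLong = 0, 0
--     for char in alphabet:
--         tmpLong, tmpIndex = longest(string, char)
--         if tmpLong > long:
--             long, index = tmpLong, tmpIndex
--     return long, index
-- ===== SOURCE B (Python) =====
-- def longestAlphabet(string, alphabet):
--     # One pass over string: record, per character, its longest (first) run in a dict;
--     # then one pass over alphabet picking the best entry.
--     best = {}
--     cur_char, cur_start, cur_len = None, 0, 0
--     for i, c in enumerate(string):
--         if cur_char is not None and c == cur_char:
--             cur_len += 1
--         else:
--             if cur_char is not None and cur_len > best.get(cur_char, (0, 0))[0]: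
--                 best[cur_char] = (cur_len, cur_start)
--             cur_char, cur_start, cur_len = c, i, 1
--     if cur_char is not None and cur_len > best.get(cur_char, (0, 0))[0]:
--         best[cur_char] = (cur_len, cur_start)
--     long, index = 0, 0
--     for char in alphabet:
--         l, idx = best.get(char, (0, 0))
--         if l > long:
--             long, index = l, idx
--     return long, index
-- ===== Notes on version B (the rewrite author's own statement) =====
-- stated objective: faster
-- what changed: A rescans the whole string once per alphabet character; B makes a single pass over the string building a dict mapping each character to its longest (first) run, then a single pass over the alphabet.
import Mathlib
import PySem

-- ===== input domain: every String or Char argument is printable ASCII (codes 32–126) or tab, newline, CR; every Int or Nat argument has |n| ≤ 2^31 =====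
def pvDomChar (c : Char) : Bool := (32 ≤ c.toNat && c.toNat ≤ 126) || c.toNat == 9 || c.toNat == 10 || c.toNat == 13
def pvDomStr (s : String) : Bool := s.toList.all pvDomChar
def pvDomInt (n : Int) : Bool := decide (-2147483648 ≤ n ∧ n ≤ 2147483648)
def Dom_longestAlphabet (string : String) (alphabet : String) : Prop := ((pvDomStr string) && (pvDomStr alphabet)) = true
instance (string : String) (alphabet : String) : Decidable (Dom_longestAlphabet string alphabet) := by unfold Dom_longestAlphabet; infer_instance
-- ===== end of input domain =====

-- B replaces A's per-alphabet-char rescan of the string (O(|alphabet|·|string|)) by ONE pass over the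
-- string building a dict of each character's longest first run, then one pass over the alphabet.

-- ===== PORT A =====
-- A's inner-loop body of `longest` (state: index, tmpIndex, long, tmpLong)
def longestStep (char : Char) (st : Int × Int × Int × Int) (p : Int × Char) : Int × Int × Int × Int :=
  match st, p with
  | (index, tmpIndex, long, tmpLong), (i, c) =>
    if c == char then
      (index, (if tmpLong == 0 then i else tmpIndex), long, tmpLong + 1)
    else
      if tmpLong > long then (tmpIndex, 0, tmpLong, 0) else (index, 0, long, 0)

-- A's helper `longest(string, char)`
def longest (s : List Char) (char : Char) : Int × Int :=
  match (PySem.List.enumerate s 0).foldl (longestStep char) (0, 0, 0, 0) with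
  | (index, tmpIndex, long, tmpLong) =>
    if tmpLong > long then (tmpLong, tmpIndex) else (long, index)

def longestAlphabet (string : String) (alphabet : String) : Int × Int :=
  alphabet.toList.foldl
    (fun (st : Int × Int) (char : Char) =>
      match st, longest string.toList char with
      | (long, index), (tmpLong, tmpIndex) =>
        if tmpLong > long then (tmpLong, tmpIndex) else (long, index))
    (0, 0)

-- ===== PORT B =====
-- commit the current run into the per-character best dict (B's repeated `if … : best[cur_char] = …`)
def commitRun (best : PySem.Dict Char (Int × Int)) (cur : Option (Char × Int × Int)) :
    PySem.Dict Char (Int × Int) :=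
  match cur with
  | none => best
  | some (cc, cs, cl) => if cl > (best.getD cc (0, 0)).1 then best.insert cc (cl, cs) else best

-- B's string-loop body (state: best dict, current run as Option (char, start, len))
def runStep (st : PySem.Dict Char (Int × Int) × Option (Char × Int × Int)) (p : Int × Char) :
    PySem.Dict Char (Int × Int) × Option (Char × Int × Int) :=
  match st, p with
  | (best, cur), (i, c) =>
    match cur with
    | some (cc, cs, cl) =>
      if c == cc then (best, some (cc, cs, cl + 1)) else (commitRun best (some (cc, cs, cl)), some (c, i, 1))
    | none => (best, some (c, i, 1))

-- the dict after B's first loop and the trailing commit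
def bestOf (s : List Char) : PySem.Dict Char (Int × Int) :=
  match (PySem.List.enumerate s 0).foldl runStep (PySem.Dict.empty, none) with
  | (best, cur) => commitRun best cur

def longestAlphabet_alt (string : String) (alphabet : String) : Int × Int :=
  let best := bestOf string.toList
  alphabet.toList.foldl
    (fun (st : Int × Int) (char : Char) =>
      match st, best.getD char (0, 0) with
      | (long, index), (l, idx) => if l > long then (l, idx) else (long, index))
    (0, 0)

-- ===== PRECONDITION & SPEC =====
def Spec_longestAlphabet (string : String) (alphabet : String) (out : Int × Int) : Prop := out = longestAlphabet_alt string alphabet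
instance (string : String) (alphabet : String) (out : Int × Int) : Decidable (Spec_longestAlphabet string alphabet out) := by unfold Spec_longestAlphabet; infer_instance

-- ===== CLAIM (what is proved, stated in full; the proofs are below) =====
def Claim_equal_longestAlphabet : Prop := ∀ (string : String) (alphabet : String), Dom_longestAlphabet string alphabet → Spec_longestAlphabet string alphabet (longestAlphabet string alphabet)

-- ===== LEMMAS AND PROOFS =====

-- the A-state of `longest s t`'s loop, read off B's state (best dict, current run)
def tmpOf (t : Char) (cur : Option (Char × Int × Int)) : Int × Int :=
  match cur with
  | none => (0, 0)
  | some (cc, cs, cl) => if cc = t then (cl, cs) else (0, 0)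

def astOf (t : Char) (best : PySem.Dict Char (Int × Int)) (cur : Option (Char × Int × Int)) :
    Int × Int × Int × Int :=
  ((best.getD t (0, 0)).2, (tmpOf t cur).2, (best.getD t (0, 0)).1, (tmpOf t cur).1)

def goodCur (cur : Option (Char × Int × Int)) : Prop :=
  match cur with
  | none => True
  | some (_, _, cl) => 1 ≤ cl

lemma step_eq (t : Char) (best : PySem.Dict Char (Int × Int)) (cur : Option (Char × Int × Int))
    (hc : goodCur cur) (h0 : 0 ≤ (best.getD t (0, 0)).1) (i : Int) (x : Char) :
    longestStep t (astOf t best cur) (i, x) = astOf t (runStep (best, cur) (i, x)).1 (runStep (best, cur) (i, x)).2 ∧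
    goodCur (runStep (best, cur) (i, x)).2 ∧
    0 ≤ (((runStep (best, cur) (i, x)).1).getD t (0, 0)).1 := by
  cases cur with
  | none =>
    by_cases hxt : x = t
    · subst hxt
      simp [runStep, astOf, tmpOf, longestStep, goodCur]
      exact h0
    · simp [runStep, astOf, tmpOf, longestStep, goodCur, hxt, not_lt.mpr h0]
      exact h0
  | some p =>
    obtain ⟨cc, cs, cl⟩ := p
    have hcl : 1 ≤ cl := hc
    by_cases hxc : x = cc
    · subst hxc
      by_cases hxt : x = t
      · subst hxt
        have : ¬ (cl == 0) = true := by simp; omega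
        simp [runStep, astOf, tmpOf, longestStep, goodCur, this, h0]
        omega
      · simp [runStep, astOf, tmpOf, longestStep, goodCur, hxt, not_lt.mpr h0, h0]
        omega
    · by_cases hct : cc = t
      · subst hct
        have hxt : ¬ (x = cc) := hxc
        by_cases hgt : cl > (best.getD cc (0, 0)).1
        · simp [runStep, astOf, tmpOf, longestStep, goodCur, commitRun, hxc, hgt]
          omega
        · simp [runStep, astOf, tmpOf, longestStep, goodCur, commitRun, hxc, hgt, h0]
      · have hbest : ((commitRun best (some (cc, cs, cl))).getD t (0, 0)) = best.getD t (0, 0) := by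
          simp only [commitRun]
          split
          · rw [PySem.Dict.getD_insert]; simp [Ne.symm hct]
          · rfl
        by_cases hxt : x = t
        · subst hxt
          simp [runStep, astOf, tmpOf, longestStep, goodCur, hxc, hct, hbest, h0]
        · simp [runStep, astOf, tmpOf, longestStep, goodCur, hxc, hct, hxt, hbest, not_lt.mpr h0, h0]

lemma final_eq (t : Char) (best : PySem.Dict Char (Int × Int)) (cur : Option (Char × Int × Int))
    (h0 : 0 ≤ (best.getD t (0, 0)).1) :
    (match astOf t best cur with
     | (index, tmpIndex, long, tmpLong) => if tmpLong > long then (tmpLong, tmpIndex) else (long, index)) =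
    (commitRun best cur).getD t (0, 0) := by
  cases cur with
  | none => simp [astOf, tmpOf, commitRun, not_lt.mpr h0]
  | some p =>
    obtain ⟨cc, cs, cl⟩ := p
    by_cases hct : cc = t
    · subst hct
      by_cases hgt : cl > (best.getD cc (0, 0)).1
      · simp [astOf, tmpOf, commitRun, hgt]
      · simp [astOf, tmpOf, commitRun, hgt]
    · have hbest : ((commitRun best (some (cc, cs, cl))).getD t (0, 0)) = best.getD t (0, 0) := by
        simp only [commitRun]
        split
        · rw [PySem.Dict.getD_insert]; simp [Ne.symm hct]
        · rfl
      simp [astOf, tmpOf, hct, hbest, not_lt.mpr h0]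

lemma loop_inv (t : Char) (xs : List Char) : ∀ (i : Int) (best : PySem.Dict Char (Int × Int))
    (cur : Option (Char × Int × Int)), goodCur cur → 0 ≤ (best.getD t (0, 0)).1 →
    (PySem.List.enumerate xs i).foldl (longestStep t) (astOf t best cur) =
      astOf t ((PySem.List.enumerate xs i).foldl runStep (best, cur)).1
              ((PySem.List.enumerate xs i).foldl runStep (best, cur)).2 ∧
    goodCur ((PySem.List.enumerate xs i).foldl runStep (best, cur)).2 ∧
    0 ≤ ((((PySem.List.enumerate xs i).foldl runStep (best, cur)).1).getD t (0, 0)).1 := by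
  induction xs with
  | nil => intro i best cur hc h0; exact ⟨by simp [PySem.List.enumerate], hc, h0⟩
  | cons x xs ih =>
    intro i best cur hc h0
    rw [PySem.List.enumerate_cons]
    obtain ⟨heq, hc2, h02⟩ := step_eq t best cur hc h0 i x
    simp only [List.foldl_cons, heq]
    exact ih (i + 1) (runStep (best, cur) (i, x)).1 (runStep (best, cur) (i, x)).2 hc2 h02

lemma longest_eq_bestOf (s : List Char) (t : Char) :
    longest s t = (bestOf s).getD t (0, 0) := by
  have h0 : (0 : Int) ≤ ((PySem.Dict.empty : PySem.Dict Char (Int × Int)).getD t (0, 0)).1 := by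
    simp
  have hini : ((0 : Int), (0 : Int), (0 : Int), (0 : Int)) =
      astOf t (PySem.Dict.empty) none := by
    simp [astOf, tmpOf]
  obtain ⟨heq, hc, h02⟩ := loop_inv t s 0 PySem.Dict.empty none trivial h0
  unfold longest bestOf
  rw [hini, heq]
  have hf := final_eq t ((PySem.List.enumerate s 0).foldl runStep (PySem.Dict.empty, none)).1
    ((PySem.List.enumerate s 0).foldl runStep (PySem.Dict.empty, none)).2 h02
  rw [hf]

theorem longestAlphabet_spec : Claim_equal_longestAlphabet := by
  intro string alphabet _
  unfold Spec_longestAlphabet longestAlphabet longestAlphabet_alt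
  simp only [longest_eq_bestOf]
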